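-- pv_equiv track=rewrite | github.com/ministryofjustice/modernisation-platform-environments | terraform/environments/ppud/lambda_scripts/disk_info_report_prod.py | format_disk_info
-- ===== SOURCE A (Python) =====
-- def format_disk_info(disk_info):
--     # Sort disk_info to place the C drive first
--     sorted_disk_info = sorted(disk_info, key=lambda x: (x[2] != 'C', x))
--
--     formatted_info = """<table border="1" style="border-collapse: collapse; width: 100%;">
--                         <tr style="background-color: #f2f2f2;">
--                             <th style="padding: 8px; text-align: left;">Server</th>
--                             <th style="padding: 8px; text-align: left;">Date</th>
--                             <th style="padding: 8px; text-align: left;">Drive</th>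
--                             <th style="padding: 8px; text-align: left;">Drive Label</th>
--                             <th style="padding: 8px; text-align: left;">File System</th>
--                             <th style="padding: 8px; text-align: left;">Total Capacity (GB)</th>
--                             <th style="padding: 8px; text-align: left;">Used Capacity (GB)</th>
--                             <th style="padding: 8px; text-align: left;">Free Space (GB)</th>
--                             <th style="padding: 8px; text-align: left;">% Free Space</th>
--                             <th style="padding: 8px; text-align: left;">Status</th>
--                         </tr>"""
--
--     current_hostname = None
--     for info in sorted_disk_info:
--         if current_hostname != info[0]:
--             if current_hostname is not None:
--                 formatted_info += f"""<tr><td colspan="10" style="height: 20px;"></td></tr>"""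
--             current_hostname = info[0]
--
--         status = info[9].strip().capitalize()
--         status_color = {
--             'Good': 'green',
--             'Low': 'teal',
--             'Warning': 'orange',
--             'Critical': 'red'
--         }.get(status, 'black')
--
--         formatted_info += f"""<tr>
--                                 <td style="padding: 8px; text-align: left;">{info[0]}</td>
--                                 <td style="padding: 8px; text-align: left;">{info[1]}</td>
--                                 <td style="padding: 8px; text-align: left;">{info[2]}</td>
--                                 <td style="padding: 8px; text-align: left;">{info[3]}</td>
--                                 <td style="padding: 8px; text-align: left;">{info[4]}</td>
--                                 <td style="padding: 8px; text-align: left;">{info[5]}</td>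
--                                 <td style="padding: 8px; text-align: left;">{info[6]}</td>
--                                 <td style="padding: 8px; text-align: left;">{info[7]}</td>
--                                 <td style="padding: 8px; text-align: left;">{info[8]}</td>
--                                 <td style="padding: 8px; text-align: left; background-color: {status_color};">{info[9]}</td>
--                               </tr>"""
--     formatted_info += "</table>"
--     return formatted_info
-- ===== SOURCE B (Python) =====
-- # B: explicit run-grouping + join of per-group row blocks instead of A's current_hostname sentinel fold.
-- def format_disk_info(disk_info):
--     sorted_disk_info = sorted(disk_info, key=lambda x: (x[2] != 'C', x))
--
--     header = """<table border="1" style="border-collapse: collapse; width: 100%;">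
--                         <tr style="background-color: #f2f2f2;">
--                             <th style="padding: 8px; text-align: left;">Server</th>
--                             <th style="padding: 8px; text-align: left;">Date</th>
--                             <th style="padding: 8px; text-align: left;">Drive</th>
--                             <th style="padding: 8px; text-align: left;">Drive Label</th>
--                             <th style="padding: 8px; text-align: left;">File System</th>
--                             <th style="padding: 8px; text-align: left;">Total Capacity (GB)</th>
--                             <th style="padding: 8px; text-align: left;">Used Capacity (GB)</th>
--                             <th style="padding: 8px; text-align: left;">Free Space (GB)</th>
--                             <th style="padding: 8px; text-align: left;">% Free Space</th>
--                             <th style="padding: 8px; text-align: left;">Status</th>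
--                         </tr>"""
--
--     def row(info):
--         status = info[9].strip().capitalize()
--         status_color = {
--             'Good': 'green',
--             'Low': 'teal',
--             'Warning': 'orange',
--             'Critical': 'red'
--         }.get(status, 'black')
--         return f"""<tr>
--                                 <td style="padding: 8px; text-align: left;">{info[0]}</td>
--                                 <td style="padding: 8px; text-align: left;">{info[1]}</td>
--                                 <td style="padding: 8px; text-align: left;">{info[2]}</td>
--                                 <td style="padding: 8px; text-align: left;">{info[3]}</td>
--                                 <td style="padding: 8px; text-align: left;">{info[4]}</td>
--                                 <td style="padding: 8px; text-align: left;">{info[5]}</td>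
--                                 <td style="padding: 8px; text-align: left;">{info[6]}</td>
--                                 <td style="padding: 8px; text-align: left;">{info[7]}</td>
--                                 <td style="padding: 8px; text-align: left;">{info[8]}</td>
--                                 <td style="padding: 8px; text-align: left; background-color: {status_color};">{info[9]}</td>
--                               </tr>"""
--
--     # consecutive runs of equal hostname
--     groups = []
--     i, n = 0, len(sorted_disk_info)
--     while i < n:
--         j = i + 1
--         while j < n and sorted_disk_info[j][0] == sorted_disk_info[i][0]:
--             j += 1
--         groups.append(sorted_disk_info[i:j])
--         i = j
--
--     separator = """<tr><td colspan="10" style="height: 20px;"></td></tr>"""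
--     body = separator.join("".join(row(info) for info in g) for g in groups)
--     return header + body + "</table>"
-- ===== Notes on version B (the rewrite author's own statement) =====
-- stated objective: alternative
-- what changed: Replaces A's current_hostname-sentinel fold (deciding before each row whether to emit a separator) by explicit grouping of the sorted list into consecutive same-hostname runs, rendering each run's rows into a block and joining the blocks with the blank separator row.
import Mathlib
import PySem

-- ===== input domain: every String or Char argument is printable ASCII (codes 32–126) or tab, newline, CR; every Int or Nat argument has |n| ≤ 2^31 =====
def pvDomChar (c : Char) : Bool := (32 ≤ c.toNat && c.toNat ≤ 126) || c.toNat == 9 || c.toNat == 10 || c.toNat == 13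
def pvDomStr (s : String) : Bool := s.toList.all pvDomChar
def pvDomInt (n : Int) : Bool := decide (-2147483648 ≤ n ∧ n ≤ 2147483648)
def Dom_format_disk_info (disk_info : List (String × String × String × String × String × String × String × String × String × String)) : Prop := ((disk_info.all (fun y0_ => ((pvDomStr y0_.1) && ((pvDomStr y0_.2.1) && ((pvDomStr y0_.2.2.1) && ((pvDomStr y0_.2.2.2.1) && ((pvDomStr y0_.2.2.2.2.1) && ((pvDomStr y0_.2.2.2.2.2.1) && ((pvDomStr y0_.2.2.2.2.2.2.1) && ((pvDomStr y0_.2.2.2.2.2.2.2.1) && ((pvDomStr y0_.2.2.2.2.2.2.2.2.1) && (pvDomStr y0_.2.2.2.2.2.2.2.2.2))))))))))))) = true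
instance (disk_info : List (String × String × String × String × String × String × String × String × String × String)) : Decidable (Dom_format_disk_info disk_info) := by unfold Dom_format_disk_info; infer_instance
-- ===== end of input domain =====

-- B replaces A's current_hostname-sentinel loop by explicit grouping of consecutive
-- same-hostname runs and joining the per-group row blocks with the blank separator row
-- (objective: alternative decomposition, same output byte for byte).

abbrev pvRowT : Type := String × String × String × String × String × String × String × String × String × String

-- shared literal fragments of A's (and B's) f-strings
def pvHeader : String := "<table border=\"1\" style=\"border-collapse: collapse; width: 100%;\">\n                        <tr style=\"background-color: #f2f2f2;\">\n                            <th style=\"padding: 8px; text-align: left;\">Server</th>\n                            <th style=\"padding: 8px; text-align: left;\">Date</th>\n                            <th style=\"padding: 8px; text-align: left;\">Drive</th>\n                            <th style=\"padding: 8px; text-align: left;\">Drive Label</th>\n                            <th style=\"padding: 8px; text-align: left;\">File System</th>\n                            <th style=\"padding: 8px; text-align: left;\">Total Capacity (GB)</th>\n                            <th style=\"padding: 8px; text-align: left;\">Used Capacity (GB)</th>\n                            <th style=\"padding: 8px; text-align: left;\">Free Space (GB)</th>\n                            <th style=\"padding: 8px; text-align: left;\">% Free Space</th>\n                            <th style=\"padding: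 8px; text-align: left;\">Status</th>\n                        </tr>"
def pvSep : String := "<tr><td colspan=\"10\" style=\"height: 20px;\"></td></tr>"
def pvCellPre : String := "<tr>\n                                <td style=\"padding: 8px; text-align: left;\">"
def pvCellMid : String := "</td>\n                                <td style=\"padding: 8px; text-align: left;\">"
def pvCellMid9 : String := "</td>\n                                <td style=\"padding: 8px; text-align: left; background-color: "
def pvCellEnd : String := "</td>\n                              </tr>"

-- s.capitalize(): first char uppercased, rest lowercased (exact on ASCII)
def pvCapitalize (s : String) : String :=
  match s.toList with
  | [] => ""
  | c :: cs => String.ofList (PySem.Chars.upperChar c :: cs.map PySem.Chars.lowerChar)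

-- the status-colour dict lookup {...}.get(status, 'black')
def pvStatusColor (status : String) : String :=
  if status = "Good" then "green"
  else if status = "Low" then "teal"
  else if status = "Warning" then "orange"
  else if status = "Critical" then "red"
  else "black"

-- one <tr>…</tr> row (the f-string both versions share)
def pvRow (info : pvRowT) : String :=
  let status := pvCapitalize (PySem.Str.strip info.2.2.2.2.2.2.2.2.2)
  let color := pvStatusColor status
  pvCellPre ++ info.1 ++ pvCellMid ++ info.2.1 ++ pvCellMid ++ info.2.2.1 ++ pvCellMid ++
    info.2.2.2.1 ++ pvCellMid ++ info.2.2.2.2.1 ++ pvCellMid ++ info.2.2.2.2.2.1 ++ pvCellMid ++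
    info.2.2.2.2.2.2.1 ++ pvCellMid ++ info.2.2.2.2.2.2.2.1 ++ pvCellMid ++
    info.2.2.2.2.2.2.2.2.1 ++ pvCellMid9 ++ color ++ ";\">" ++ info.2.2.2.2.2.2.2.2.2 ++ pvCellEnd

-- sort key (x[2] != 'C', x): tuple of strings compared as the corresponding list
def pvKey2 (x : pvRowT) : List String :=
  [x.1, x.2.1, x.2.2.1, x.2.2.2.1, x.2.2.2.2.1, x.2.2.2.2.2.1, x.2.2.2.2.2.2.1,
   x.2.2.2.2.2.2.2.1, x.2.2.2.2.2.2.2.2.1, x.2.2.2.2.2.2.2.2.2]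

-- the body of A's for loop (state: formatted_info, current_hostname)
def pvStepA (acc : String × Option String) (info : pvRowT) : String × Option String :=
  let acc1 : String × Option String :=
    if acc.2 ≠ some info.1 then
      ((if acc.2.isSome then acc.1 ++ pvSep else acc.1), some info.1)
    else acc
  (acc1.1 ++ pvRow info, acc1.2)

-- ===== PORT A =====
def format_disk_info (disk_info : List (String × String × String × String × String × String × String × String × String × String)) : String :=
  let sorted_disk_info := PySem.List.sorted2 disk_info (fun x => decide (x.2.2.1 ≠ "C")) pvKey2
  let st : String × Option String := sorted_disk_info.foldl pvStepA (pvHeader, none)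
  st.1 ++ "</table>"

-- ===== PORT B =====
-- the inner while loop of B: longest prefix of hostname h, and the remainder
def pvRun (h : String) : List pvRowT → List pvRowT × List pvRowT
  | [] => ([], [])
  | x :: xs => if x.1 == h then ((x :: (pvRun h xs).1), (pvRun h xs).2) else ([], x :: xs)

theorem pvRun_snd_length (h : String) (xs : List pvRowT) : (pvRun h xs).2.length ≤ xs.length := by
  induction xs with
  | nil => simp [pvRun]
  | cons x xs ih =>
    simp only [pvRun]
    split
    · simpa using Nat.le_succ_of_le ih
    · simp

-- the outer while loop of B: consecutive runs of equal hostname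
def pvGroups : List pvRowT → List (List pvRowT)
  | [] => []
  | x :: xs => (x :: (pvRun x.1 xs).1) :: pvGroups (pvRun x.1 xs).2
termination_by xs => xs.length
decreasing_by
  exact Nat.lt_succ_of_le (pvRun_snd_length _ _)

-- "".join(row(info) for info in g)
def pvBlock : List pvRowT → String
  | [] => ""
  | x :: xs => pvRow x ++ pvBlock xs

-- separator.join(blocks)
def pvJoinSep : List String → String
  | [] => ""
  | [b] => b
  | b :: bs => b ++ pvSep ++ pvJoinSep bs

def format_disk_info_alt (disk_info : List (String × String × String × String × String × String × String × String × String × String)) : String :=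
  let sorted_disk_info := PySem.List.sorted2 disk_info (fun x => decide (x.2.2.1 ≠ "C")) pvKey2
  pvHeader ++ pvJoinSep ((pvGroups sorted_disk_info).map pvBlock) ++ "</table>"

-- ===== PRECONDITION & SPEC =====
def Spec_format_disk_info (disk_info : List (String × String × String × String × String × String × String × String × String × String)) (out : String) : Prop := out = format_disk_info_alt disk_info
instance (disk_info : List (String × String × String × String × String × String × String × String × String × String)) (out : String) : Decidable (Spec_format_disk_info disk_info out) := by unfold Spec_format_disk_info; infer_instance

-- ===== CLAIM (what is proved, stated in full; the proofs are below) =====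
def Claim_equal_format_disk_info : Prop := ∀ (disk_info : List (String × String × String × String × String × String × String × String × String × String)), Dom_format_disk_info disk_info → Spec_format_disk_info disk_info (format_disk_info disk_info)

-- ===== LEMMAS AND PROOFS =====

-- A's loop, as a function of the remaining list and current_hostname
def pvLoopA : List pvRowT → Option String → String
  | [], _ => ""
  | info :: xs, cur =>
    (if cur ≠ some info.1 ∧ cur.isSome then pvSep ++ pvRow info else pvRow info) ++
      pvLoopA xs (some info.1)

theorem pvFoldA_eq_loopA (xs : List pvRowT) : ∀ (acc : String) (cur : Option String),
    (xs.foldl pvStepA (acc, cur)).1 = acc ++ pvLoopA xs cur := by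
  induction xs with
  | nil => intro acc cur; simp [pvLoopA]
  | cons x xs ih =>
    intro acc cur
    by_cases h : cur = some x.1
    · have hs : pvStepA (acc, cur) x = (acc ++ pvRow x, some x.1) := by
        simp [pvStepA, h]
      rw [List.foldl_cons, hs, ih]
      simp [pvLoopA, h, String.append_assoc]
    · cases cur with
      | none =>
        have hs : pvStepA (acc, none) x = (acc ++ pvRow x, some x.1) := by
          simp [pvStepA]
        rw [List.foldl_cons, hs, ih]
        simp [pvLoopA, String.append_assoc]
      | some h' =>
        have hs : pvStepA (acc, some h') x = (acc ++ pvSep ++ pvRow x, some x.1) := by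
          simp [pvStepA, h]
        rw [List.foldl_cons, hs, ih]
        simp [pvLoopA, h, String.append_assoc]

theorem pvLoopA_some (h : String) (xs : List pvRowT) :
    pvLoopA xs (some h) =
      pvBlock (pvRun h xs).1 ++
        (match (pvRun h xs).2 with
         | [] => ""
         | y :: ys => pvSep ++ pvLoopA (y :: ys) none) := by
  induction xs with
  | nil => simp [pvRun, pvLoopA, pvBlock]
  | cons x xs ih =>
    by_cases hx : x.1 = h
    · simp only [pvRun, hx, beq_self_eq_true, if_true]
      simp only [pvLoopA, hx, ne_eq, not_true_eq_false, false_and, if_neg, not_false_eq_true]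
      rw [ih]
      simp only [pvBlock, String.append_assoc]
      cases (pvRun h xs).2 with
      | nil => rfl
      | cons y ys => simp [pvLoopA]
    · have hb : (x.1 == h) = false := beq_eq_false_iff_ne.mpr hx
      simp only [pvRun, hb, Bool.false_eq_true, if_neg, not_false_eq_true]
      have hne : some h ≠ some x.1 := by simpa using fun e => hx e.symm
      simp only [pvLoopA, hne, ne_eq, not_false_eq_true, Option.isSome_some, and_true, if_pos,
        pvBlock]
      simp [String.append_assoc]

theorem pvGroups_ne_nil (x : pvRowT) (xs : List pvRowT) : pvGroups (x :: xs) ≠ [] := by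
  simp [pvGroups]

theorem pvLoopA_none_eq (xs : List pvRowT) :
    pvLoopA xs none = pvJoinSep ((pvGroups xs).map pvBlock) := by
  induction xs using pvGroups.induct with
  | case1 => simp [pvLoopA, pvGroups, pvJoinSep]
  | case2 x xs ih =>
    simp only [pvLoopA, ne_eq, Option.isSome_none, and_false, if_neg, not_false_eq_true,
      reduceCtorEq]
    rw [pvLoopA_some, pvGroups]
    cases hrest : (pvRun x.1 xs).2 with
    | nil =>
      simp [pvGroups, pvJoinSep, pvBlock, String.append_assoc]
    | cons y ys =>
      have hred : (match y :: ys with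
          | ([] : List pvRowT) => ""
          | y :: ys => pvSep ++ pvLoopA (y :: ys) none) = pvSep ++ pvLoopA (y :: ys) none := rfl
      rw [hrest] at ih
      rw [hred, ih]
      cases hg : pvGroups (y :: ys) with
      | nil => exact absurd hg (pvGroups_ne_nil y ys)
      | cons g gs =>
        simp [pvJoinSep, pvBlock, String.append_assoc]

-- ===== VERDICT (by name: the statement is the Claim_ definition above) =====
theorem format_disk_info_spec : Claim_equal_format_disk_info := by
  intro disk_info _
  show ((PySem.List.sorted2 disk_info (fun x => decide (x.2.2.1 ≠ "C")) pvKey2).foldl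
      pvStepA (pvHeader, none)).1 ++ "</table>"
    = pvHeader ++ pvJoinSep ((pvGroups (PySem.List.sorted2 disk_info
          (fun x => decide (x.2.2.1 ≠ "C")) pvKey2)).map pvBlock) ++ "</table>"
  rw [pvFoldA_eq_loopA, pvLoopA_none_eq, String.append_assoc]
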